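-- pv_equiv track=rewrite | github.com/szu-advtech/AdvTech | 2022/28-张彬 指导老师-许智武/Rust-Lib-Testing/scripts/autoConfig.py | add_fuzz_target_generator_in_bootstrap_tool
-- ===== SOURCE A (Python) =====
-- def add_fuzz_target_generator_in_bootstrap_tool(curline):
--     saveline = []
--     for line in curline:
--         if "pub struct Rustdoc {" in line:
--             saveline.append(line.replace("Rustdoc","FuzzTargetGenerator",1))
--         elif "impl Step for Rustdoc {" in line:
--             saveline.append(line.replace("Rustdoc","FuzzTargetGenerator",1))
--         elif "Rustdoc" in line:
--             saveline.append(line.replace("Rustdoc","FuzzTargetGenerator",1))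
--         elif "src/tools/rustdoc" in line:
--             saveline.append(line.replace("src/tools/rustdoc","src/tools/fuzz-target-generator",1))
--         elif '.join(exe("rustdoc"' in line:
--             saveline.append(line.replace('exe("rustdoc"','exe("fuzz-target-generator"' ,1))
--         elif '.join(exe("rustdoc_tool_binary"' in line:
--             saveline.append(line.replace('exe("rustdoc_tool_binary"','exe("fuzz-target-generator"' ,1))
--         else:
--             saveline.append(line)
--     return saveline
-- ===== SOURCE B (Python) =====
-- # Rule-major staged rewriting: four whole-list passes, one per rewrite rule,
-- # over (done, line) states, instead of A's single line-major elif-chain pass.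
-- # Correct because each line is rewritten by at most one rule (the done flag),
-- # and the stages run in the elif chain's priority order (A's first three
-- # branches are all the "Rustdoc" rule).
--
-- RULES = [
--     ("Rustdoc", "Rustdoc", "FuzzTargetGenerator"),
--     ("src/tools/rustdoc", "src/tools/rustdoc", "src/tools/fuzz-target-generator"),
--     ('.join(exe("rustdoc"', 'exe("rustdoc"', 'exe("fuzz-target-generator"'),
--     ('.join(exe("rustdoc_tool_binary"', 'exe("rustdoc_tool_binary"', 'exe("fuzz-target-generator"'),
-- ]
--
--
-- def _step(cond, old, new, state):
--     done, s = state
--     if not done and cond in s: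
--         return (True, s.replace(old, new, 1))
--     return (done, s)
--
--
-- def add_fuzz_target_generator_in_bootstrap_tool(curline):
--     states = [(False, line) for line in curline]
--     for cond, old, new in RULES:
--         states = [_step(cond, old, new, st) for st in states]
--     return [s for _, s in states]
-- ===== Notes on version B (the rewrite author's own statement) =====
-- stated objective: alternative
-- what changed: Rule-major staged rewriting: four whole-list passes (one per rewrite rule) over (done, line) states replace A's single line-major pass through a seven-branch elif chain; correct because each line is rewritten by at most one rule and the stages keep the chain's priority order.
import Mathlib
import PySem

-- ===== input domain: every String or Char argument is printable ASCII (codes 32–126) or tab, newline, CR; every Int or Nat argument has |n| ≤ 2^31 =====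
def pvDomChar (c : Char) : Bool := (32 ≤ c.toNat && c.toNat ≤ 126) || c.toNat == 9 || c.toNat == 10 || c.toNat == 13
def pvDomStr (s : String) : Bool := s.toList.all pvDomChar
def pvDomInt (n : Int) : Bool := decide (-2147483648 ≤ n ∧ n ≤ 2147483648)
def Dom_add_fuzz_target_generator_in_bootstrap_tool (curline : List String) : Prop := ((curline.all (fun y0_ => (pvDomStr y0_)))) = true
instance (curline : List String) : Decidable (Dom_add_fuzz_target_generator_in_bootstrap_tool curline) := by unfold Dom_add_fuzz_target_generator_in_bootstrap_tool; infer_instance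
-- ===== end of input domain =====

-- B rewrites rule-major: four whole-list passes, one per rule, over (done, line)
-- states, instead of A's line-major elif-chain pass (objective: alternative; same cost).

-- shared primitive: Python's str.replace(old, new, 1) (count = 1), exact
def pyReplace1Chars (old new : List Char) : List Char → List Char
  | [] => if old.isEmpty then new else []
  | c :: rest =>
      if old.isPrefixOf (c :: rest) then new ++ (c :: rest).drop old.length
      else c :: pyReplace1Chars old new rest

def pyReplace1 (s old new : String) : String :=
  String.ofList (pyReplace1Chars old.toList new.toList s.toList)

-- ===== PORT A =====
def add_fuzz_target_generator_in_bootstrap_tool (curline : List String) : List String :=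
  curline.foldl
    (fun saveline line =>
      if PySem.Str.isIn "pub struct Rustdoc {" line then
        saveline ++ [pyReplace1 line "Rustdoc" "FuzzTargetGenerator"]
      else if PySem.Str.isIn "impl Step for Rustdoc {" line then
        saveline ++ [pyReplace1 line "Rustdoc" "FuzzTargetGenerator"]
      else if PySem.Str.isIn "Rustdoc" line then
        saveline ++ [pyReplace1 line "Rustdoc" "FuzzTargetGenerator"]
      else if PySem.Str.isIn "src/tools/rustdoc" line then
        saveline ++ [pyReplace1 line "src/tools/rustdoc" "src/tools/fuzz-target-generator"]
      else if PySem.Str.isIn ".join(exe(\"rustdoc\"" line then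
        saveline ++ [pyReplace1 line "exe(\"rustdoc\"" "exe(\"fuzz-target-generator\""]
      else if PySem.Str.isIn ".join(exe(\"rustdoc_tool_binary\"" line then
        saveline ++ [pyReplace1 line "exe(\"rustdoc_tool_binary\"" "exe(\"fuzz-target-generator\""]
      else saveline ++ [line])
    []

-- ===== PORT B =====
def fuzzRules : List (String × String × String) :=
  [ ("Rustdoc", "Rustdoc", "FuzzTargetGenerator"),
    ("src/tools/rustdoc", "src/tools/rustdoc", "src/tools/fuzz-target-generator"),
    (".join(exe(\"rustdoc\"", "exe(\"rustdoc\"", "exe(\"fuzz-target-generator\""),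
    (".join(exe(\"rustdoc_tool_binary\"", "exe(\"rustdoc_tool_binary\"", "exe(\"fuzz-target-generator\"") ]

def fuzzStep (cond old new : String) (state : Bool × String) : Bool × String :=
  if !state.1 && PySem.Str.isIn cond state.2 then (true, pyReplace1 state.2 old new)
  else state

def add_fuzz_target_generator_in_bootstrap_tool_alt (curline : List String) : List String :=
  (fuzzRules.foldl
      (fun states r => states.map (fun st => fuzzStep r.1 r.2.1 r.2.2 st))
      (curline.map (fun line => (false, line)))).map (fun p => p.2)

-- ===== PRECONDITION & SPEC =====
def Spec_add_fuzz_target_generator_in_bootstrap_tool (curline : List String) (out : List String) : Prop := out = add_fuzz_target_generator_in_bootstrap_tool_alt curline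
instance (curline : List String) (out : List String) : Decidable (Spec_add_fuzz_target_generator_in_bootstrap_tool curline out) := by unfold Spec_add_fuzz_target_generator_in_bootstrap_tool; infer_instance

-- ===== CLAIM (what is proved, stated in full; the proofs are below) =====
def Claim_equal_add_fuzz_target_generator_in_bootstrap_tool : Prop := ∀ (curline : List String), Dom_add_fuzz_target_generator_in_bootstrap_tool curline → Spec_add_fuzz_target_generator_in_bootstrap_tool curline (add_fuzz_target_generator_in_bootstrap_tool curline)

-- ===== LEMMAS AND PROOFS =====

-- A's per-line elif chain, named for the proofs
def chainFn (line : String) : String :=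
  if PySem.Str.isIn "pub struct Rustdoc {" line then
    pyReplace1 line "Rustdoc" "FuzzTargetGenerator"
  else if PySem.Str.isIn "impl Step for Rustdoc {" line then
    pyReplace1 line "Rustdoc" "FuzzTargetGenerator"
  else if PySem.Str.isIn "Rustdoc" line then
    pyReplace1 line "Rustdoc" "FuzzTargetGenerator"
  else if PySem.Str.isIn "src/tools/rustdoc" line then
    pyReplace1 line "src/tools/rustdoc" "src/tools/fuzz-target-generator"
  else if PySem.Str.isIn ".join(exe(\"rustdoc\"" line then
    pyReplace1 line "exe(\"rustdoc\"" "exe(\"fuzz-target-generator\""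
  else if PySem.Str.isIn ".join(exe(\"rustdoc_tool_binary\"" line then
    pyReplace1 line "exe(\"rustdoc_tool_binary\"" "exe(\"fuzz-target-generator\""
  else line

-- substring containment is transitive through the literal conditions
theorem isIn_mono {a b : String} (hab : PySem.Str.isIn a b = true) {s : String}
    (h : PySem.Str.isIn b s = true) : PySem.Str.isIn a s = true := by
  rw [PySem.Str.isIn_iff_infix] at hab h ⊢
  exact hab.trans h

-- A's accumulator loop produces a ++ map chainFn l
theorem A_acc (l : List String) (a : List String) :
    l.foldl
      (fun saveline line =>
        if PySem.Str.isIn "pub struct Rustdoc {" line then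
          saveline ++ [pyReplace1 line "Rustdoc" "FuzzTargetGenerator"]
        else if PySem.Str.isIn "impl Step for Rustdoc {" line then
          saveline ++ [pyReplace1 line "Rustdoc" "FuzzTargetGenerator"]
        else if PySem.Str.isIn "Rustdoc" line then
          saveline ++ [pyReplace1 line "Rustdoc" "FuzzTargetGenerator"]
        else if PySem.Str.isIn "src/tools/rustdoc" line then
          saveline ++ [pyReplace1 line "src/tools/rustdoc" "src/tools/fuzz-target-generator"]
        else if PySem.Str.isIn ".join(exe(\"rustdoc\"" line then
          saveline ++ [pyReplace1 line "exe(\"rustdoc\"" "exe(\"fuzz-target-generator\""]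
        else if PySem.Str.isIn ".join(exe(\"rustdoc_tool_binary\"" line then
          saveline ++ [pyReplace1 line "exe(\"rustdoc_tool_binary\"" "exe(\"fuzz-target-generator\""]
        else saveline ++ [line])
      a
    = a ++ l.map chainFn := by
  induction l generalizing a with
  | nil => simp
  | cons x xs ih =>
    simp only [List.foldl_cons, List.map_cons, ih]
    have hx : (if PySem.Str.isIn "pub struct Rustdoc {" x then
          a ++ [pyReplace1 x "Rustdoc" "FuzzTargetGenerator"]
        else if PySem.Str.isIn "impl Step for Rustdoc {" x then
          a ++ [pyReplace1 x "Rustdoc" "FuzzTargetGenerator"]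
        else if PySem.Str.isIn "Rustdoc" x then
          a ++ [pyReplace1 x "Rustdoc" "FuzzTargetGenerator"]
        else if PySem.Str.isIn "src/tools/rustdoc" x then
          a ++ [pyReplace1 x "src/tools/rustdoc" "src/tools/fuzz-target-generator"]
        else if PySem.Str.isIn ".join(exe(\"rustdoc\"" x then
          a ++ [pyReplace1 x "exe(\"rustdoc\"" "exe(\"fuzz-target-generator\""]
        else if PySem.Str.isIn ".join(exe(\"rustdoc_tool_binary\"" x then
          a ++ [pyReplace1 x "exe(\"rustdoc_tool_binary\"" "exe(\"fuzz-target-generator\""]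
        else a ++ [x])
        = a ++ [chainFn x] := by
      unfold chainFn; split_ifs <;> rfl
    rw [hx, List.append_assoc]
    rfl

-- folding the elementwise stages over a mapped list commutes to a per-element fold
theorem foldl_map_stage (rules : List (String × String × String))
    (l : List (Bool × String)) :
    rules.foldl (fun states r => states.map (fun st => fuzzStep r.1 r.2.1 r.2.2 st)) l
    = l.map (fun st => rules.foldl (fun p r => fuzzStep r.1 r.2.1 r.2.2 p) st) := by
  induction rules generalizing l with
  | nil => simp
  | cons r rs ih =>
    simp only [List.foldl_cons, ih, List.map_map]
    rfl

-- fuzzStep on an already-rewritten line is the identity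
theorem fuzzStep_done (cond old new : String) (s : String) :
    fuzzStep cond old new (true, s) = (true, s) := by
  simp only [fuzzStep, Bool.not_true, Bool.false_and, Bool.false_eq_true, if_false]

-- fuzzStep fires when the condition matches an unrewritten line
theorem fuzzStep_fire (cond old new s : String) (h : PySem.Str.isIn cond s = true) :
    fuzzStep cond old new (false, s) = (true, pyReplace1 s old new) := by
  simp only [fuzzStep, Bool.not_false, Bool.true_and, h, if_true]

-- fuzzStep leaves an unrewritten line alone when the condition misses
theorem fuzzStep_skip (cond old new s : String) (h : PySem.Str.isIn cond s = false) :
    fuzzStep cond old new (false, s) = (false, s) := by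
  simp only [fuzzStep, Bool.not_false, Bool.true_and, h, Bool.false_eq_true, if_false]

-- per line, folding the four staged rules from (false, s) yields A's elif-chain value
theorem line_eq (s : String) :
    (fuzzRules.foldl (fun p r => fuzzStep r.1 r.2.1 r.2.2 p) (false, s)).2 = chainFn s := by
  simp only [fuzzRules, List.foldl_cons, List.foldl_nil]
  by_cases h1 : PySem.Str.isIn "Rustdoc" s = true
  · rw [fuzzStep_fire _ _ _ _ h1, fuzzStep_done, fuzzStep_done, fuzzStep_done]
    unfold chainFn
    split_ifs <;> rfl
  · have h1f : PySem.Str.isIn "Rustdoc" s = false := eq_false_of_ne_true h1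
    have hp : PySem.Str.isIn "pub struct Rustdoc {" s = false := by
      cases hc : PySem.Str.isIn "pub struct Rustdoc {" s with
      | false => rfl
      | true => exact absurd (isIn_mono (by decide) hc) h1
    have hi : PySem.Str.isIn "impl Step for Rustdoc {" s = false := by
      cases hc : PySem.Str.isIn "impl Step for Rustdoc {" s with
      | false => rfl
      | true => exact absurd (isIn_mono (by decide) hc) h1
    rw [fuzzStep_skip _ _ _ _ h1f]
    unfold chainFn
    simp only [hp, hi, h1f, Bool.false_eq_true, if_false]
    by_cases h2 : PySem.Str.isIn "src/tools/rustdoc" s = true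
    · rw [fuzzStep_fire _ _ _ _ h2, fuzzStep_done, fuzzStep_done, h2]; rfl
    · have h2f := eq_false_of_ne_true h2
      rw [fuzzStep_skip _ _ _ _ h2f]
      simp only [h2f, Bool.false_eq_true, if_false]
      by_cases h3 : PySem.Str.isIn ".join(exe(\"rustdoc\"" s = true
      · rw [fuzzStep_fire _ _ _ _ h3, fuzzStep_done, h3]; rfl
      · have h3f := eq_false_of_ne_true h3
        rw [fuzzStep_skip _ _ _ _ h3f]
        simp only [h3f, Bool.false_eq_true, if_false]
        by_cases h4 : PySem.Str.isIn ".join(exe(\"rustdoc_tool_binary\"" s = true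
        · rw [fuzzStep_fire _ _ _ _ h4, h4]; rfl
        · have h4f := eq_false_of_ne_true h4
          rw [fuzzStep_skip _ _ _ _ h4f]
          simp only [h4f, Bool.false_eq_true, if_false]

-- ===== VERDICT (by name: the statement is the Claim_ definition above) =====
theorem add_fuzz_target_generator_in_bootstrap_tool_spec : Claim_equal_add_fuzz_target_generator_in_bootstrap_tool := by
  intro curline _
  show _ = _
  unfold add_fuzz_target_generator_in_bootstrap_tool add_fuzz_target_generator_in_bootstrap_tool_alt
  rw [A_acc, foldl_map_stage]
  simp only [List.map_map, List.nil_append]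
  apply List.map_congr_left
  intro s _
  exact (line_eq s).symm
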